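-- pv_equiv track=rewrite | github.com/boboPD/MCS-MPs | CS412/Seq Pattern Mining/prefixspan.py | get_freq_1_itemset
-- ===== SOURCE A (Python) =====
-- def get_freq_1_itemset(db, minsup):
--     item_to_index_map = {}
--     item_to_count = {}
--     wordset = set()
--     for row, seq in enumerate(db):
--         wordset.clear()
--         for col, item in enumerate(seq):
--             if item not in wordset:
--                 wordset.add(item)
--                 if item not in item_to_count:
--                     item_to_count[item] = 1
--                 else:
--                     item_to_count[item] = item_to_count[item] + 1
--             if item in item_to_index_map:
--                 item_to_index_map[item].append((row, col))
--             else: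
--                 item_to_index_map[item] = [(row, col)]
--
--     freq_items = {item: (index_list, item_to_count[item]) for item, index_list in item_to_index_map.items() if item_to_count[item] >= minsup}
--     return freq_items
-- ===== SOURCE B (Python) =====
-- def get_freq_1_itemset(db, minsup):
--     # One pass collecting positions only; support = number of distinct rows per item.
--     positions = {}
--     for row, seq in enumerate(db):
--         for col, item in enumerate(seq):
--             positions.setdefault(item, []).append((row, col))
--     freq_items = {}
--     for item, index_list in positions.items():
--         count = len({r for r, _ in index_list})
--         if count >= minsup:
--             freq_items[item] = (index_list, count)
--     return freq_items
-- ===== Notes on version B (the rewrite author's own statement) =====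
-- stated objective: simpler
-- what changed: B drops A's per-row wordset and running count dict entirely: a single pass only collects the (row, col) position list per item, and the support is then derived per item as the number of distinct row indices in its list; the frequency filter is a plain second pass over the collected dict.
import Mathlib
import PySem

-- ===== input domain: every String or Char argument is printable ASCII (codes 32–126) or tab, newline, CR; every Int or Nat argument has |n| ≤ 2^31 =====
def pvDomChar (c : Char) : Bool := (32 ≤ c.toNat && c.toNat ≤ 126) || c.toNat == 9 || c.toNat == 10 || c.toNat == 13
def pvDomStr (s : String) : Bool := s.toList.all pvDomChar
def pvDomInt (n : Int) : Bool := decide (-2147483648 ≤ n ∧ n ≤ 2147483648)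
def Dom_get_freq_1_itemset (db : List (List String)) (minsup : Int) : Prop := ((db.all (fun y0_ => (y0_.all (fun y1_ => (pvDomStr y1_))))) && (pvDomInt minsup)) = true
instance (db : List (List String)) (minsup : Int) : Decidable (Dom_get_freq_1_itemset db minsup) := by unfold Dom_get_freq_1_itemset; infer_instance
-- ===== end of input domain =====

-- B drops the per-row wordset and the running count dict: it only collects the position
-- list per item and derives the support afterwards as the number of distinct rows
-- in that list (objective: simpler — one accumulator and a post-pass instead of three).

-- ===== PORT A =====
-- inner 'for col, item in enumerate(seq)' loop of A: state (item_to_index_map, item_to_count, wordset)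
def pvInnerA (row : Int) :
    List String → Int →
    PySem.Dict String (List (Int × Int)) × PySem.Dict String Int × PySem.Set String →
    PySem.Dict String (List (Int × Int)) × PySem.Dict String Int × PySem.Set String
  | [], _, st => st
  | item :: rest, col, (im, ic, ws) =>
      let icws :=
        if PySem.Set.contains ws item = false then
          (if ic.contains item = false then ic.insert item 1
           else ic.insert item (ic.getD item 0 + 1),
           PySem.Set.add ws item)
        else (ic, ws)
      -- 'item_to_index_map[item]' is guarded by the contains test, so getD is exact here
      let im' :=
        if im.contains item then im.insert item (im.getD item [] ++ [(row, col)])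
        else im.insert item [(row, col)]
      pvInnerA row rest (col + 1) (im', icws.1, icws.2)

-- outer 'for row, seq in enumerate(db)' loop of A; 'wordset.clear()' = start each row from the empty set
def pvLoopA :
    List (List String) → Int →
    PySem.Dict String (List (Int × Int)) × PySem.Dict String Int →
    PySem.Dict String (List (Int × Int)) × PySem.Dict String Int
  | [], _, st => st
  | seq :: rest, row, (im, ic) =>
      let st := pvInnerA row seq 0 (im, ic, PySem.Set.empty)
      pvLoopA rest (row + 1) (st.1, st.2.1)

def get_freq_1_itemset (db : List (List String)) (minsup : Int) : List (String × (List (Int × Int)) × Int) :=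
  let st := pvLoopA db 0 (PySem.Dict.empty, PySem.Dict.empty)
  -- the dict comprehension over item_to_index_map.items(); 'item_to_count[item]' always
  -- finds its key (every im key is an ic key), so getD is exact here
  ((st.1.items).foldl
    (fun (d : PySem.Dict String ((List (Int × Int)) × Int)) p =>
      if st.2.getD p.1 0 ≥ minsup then d.insert p.1 (p.2, st.2.getD p.1 0) else d)
    PySem.Dict.empty).items

-- ===== PORT B =====
-- inner loop of B: 'positions.setdefault(item, []).append((row, col))'
def pvInnerB (row : Int) :
    List String → Int → PySem.Dict String (List (Int × Int)) → PySem.Dict String (List (Int × Int))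
  | [], _, d => d
  | item :: rest, col, d => pvInnerB row rest (col + 1) (d.modify item [] (· ++ [(row, col)]))

def pvLoopB :
    List (List String) → Int → PySem.Dict String (List (Int × Int)) → PySem.Dict String (List (Int × Int))
  | [], _, d => d
  | seq :: rest, row, d => pvLoopB rest (row + 1) (pvInnerB row seq 0 d)

-- 'len({r for r, _ in index_list})'
def pvRowCount (l : List (Int × Int)) : Int :=
  ((PySem.Set.ofList (l.map Prod.fst)).length : Int)

def get_freq_1_itemset_alt (db : List (List String)) (minsup : Int) : List (String × (List (Int × Int)) × Int) :=
  let pos := pvLoopB db 0 PySem.Dict.empty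
  ((pos.items).foldl
    (fun (d : PySem.Dict String ((List (Int × Int)) × Int)) p =>
      if pvRowCount p.2 ≥ minsup then d.insert p.1 (p.2, pvRowCount p.2) else d)
    PySem.Dict.empty).items

-- ===== PRECONDITION & SPEC =====
def Spec_get_freq_1_itemset (db : List (List String)) (minsup : Int) (out : List (String × (List (Int × Int)) × Int)) : Prop := out = get_freq_1_itemset_alt db minsup
instance (db : List (List String)) (minsup : Int) (out : List (String × (List (Int × Int)) × Int)) : Decidable (Spec_get_freq_1_itemset db minsup out) := by unfold Spec_get_freq_1_itemset; infer_instance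

-- ===== CLAIM (what is proved, stated in full; the proofs are below) =====
def Claim_equal_get_freq_1_itemset : Prop := ∀ (db : List (List String)) (minsup : Int), Dom_get_freq_1_itemset db minsup → Spec_get_freq_1_itemset db minsup (get_freq_1_itemset db minsup)

-- ===== LEMMAS AND PROOFS =====

-- appending one row index to the row multiset changes the distinct-row set iff the row is new
theorem pvOfList_snoc (ys : List Int) (r : Int) :
    PySem.Set.ofList (ys ++ [r]) =
      if r ∈ ys then PySem.Set.ofList ys else PySem.Set.ofList ys ++ [r] := by
  have h1 : PySem.Set.ofList (ys ++ [r]) = PySem.Set.add (PySem.Set.ofList ys) r := by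
    rw [PySem.Set.ofList_eq_foldl, PySem.Set.ofList_eq_foldl, List.foldl_append]
    rfl
  rw [h1]
  unfold PySem.Set.add
  by_cases h : r ∈ ys
  · simp [h]
  · simp [h]

theorem pvRowCount_snoc (l : List (Int × Int)) (p : Int × Int) :
    pvRowCount (l ++ [p]) =
      if p.1 ∈ l.map Prod.fst then pvRowCount l else pvRowCount l + 1 := by
  unfold pvRowCount
  rw [List.map_append]
  simp only [List.map_cons, List.map_nil]
  rw [pvOfList_snoc]
  by_cases h : p.1 ∈ l.map Prod.fst
  · simp [h]
  · simp [h]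

-- A's index map evolves exactly as B's positions dict
theorem pvInnerA_fst (row : Int) (seq : List String) :
    ∀ (col : Int) im ic ws, (pvInnerA row seq col (im, ic, ws)).1 = pvInnerB row seq col im := by
  induction seq with
  | nil => intro col im ic ws; simp [pvInnerA, pvInnerB]
  | cons item rest ih =>
    intro col im ic ws
    simp only [pvInnerA, pvInnerB]
    rw [ih]
    congr 1
    by_cases h : im.contains item = true
    · simp [h, PySem.Dict.modify]
    · simp only [Bool.not_eq_true] at h
      simp [PySem.Dict.modify, PySem.Dict.getD_of_not_contains im ([] : List (Int × Int)) h]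

theorem pvLoopA_fst (db : List (List String)) :
    ∀ (row : Int) im ic, (pvLoopA db row (im, ic)).1 = pvLoopB db row im := by
  induction db with
  | nil => intro row im ic; simp [pvLoopA, pvLoopB]
  | cons seq rest ih =>
    intro row im ic
    simp only [pvLoopA, pvLoopB]
    rw [ih, pvInnerA_fst]

-- inner-loop invariant: the count dict stores the number of distinct rows of each index list
theorem pvInnerA_inv (row : Int) (seq : List String) :
    ∀ (col : Int) im ic (ws : PySem.Set String),
      (∀ x, ic.get? x = (im.get? x).map pvRowCount) →
      (∀ x, ws.contains x = true ↔ ∃ l, im.get? x = some l ∧ row ∈ l.map Prod.fst) →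
      (∀ x l, im.get? x = some l → ∀ p ∈ l, p.1 ≤ row) →
      (∀ x, (pvInnerA row seq col (im, ic, ws)).2.1.get? x =
          ((pvInnerA row seq col (im, ic, ws)).1.get? x).map pvRowCount) ∧
      (∀ x l, (pvInnerA row seq col (im, ic, ws)).1.get? x = some l → ∀ p ∈ l, p.1 ≤ row) := by
  induction seq with
  | nil =>
    intro col im ic ws hC hW hR
    exact ⟨fun x => hC x, hR⟩
  | cons item rest ih =>
    intro col im ic ws hC hW hR
    simp only [pvInnerA]
    by_cases hws : PySem.Set.contains ws item = true
    · -- item already seen in this row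
      obtain ⟨l₀, hl₀, hrow⟩ := (hW item).mp hws
      have hcont : im.contains item = true := by
        rw [PySem.Dict.contains_eq_isSome_get?, hl₀]; rfl
      have hgetD : im.getD item [] = l₀ := PySem.Dict.getD_of_get?_eq_some im [] hl₀
      simp only [hws, hcont, hgetD, Bool.true_eq_false, if_true, if_false]
      apply ih
      · intro x
        by_cases hx : x = item
        · subst hx
          rw [PySem.Dict.get?_insert_self, hC x, hl₀]
          simp [pvRowCount_snoc, hrow]
        · rw [PySem.Dict.get?_insert_of_ne _ _ hx]
          exact hC x
      · intro x
        by_cases hx : x = item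
        · subst hx
          rw [PySem.Dict.get?_insert_self]
          constructor
          · intro _; exact ⟨l₀ ++ [(row, col)], rfl, by simp [hrow]⟩
          · intro _; exact hws
        · rw [PySem.Dict.get?_insert_of_ne _ _ hx]
          exact hW x
      · intro x l hl p hp
        by_cases hx : x = item
        · subst hx
          rw [PySem.Dict.get?_insert_self] at hl
          cases hl
          rcases List.mem_append.mp hp with h | h
          · exact hR _ l₀ hl₀ p h
          · simp at h; subst h; exact le_refl row
        · rw [PySem.Dict.get?_insert_of_ne _ _ hx] at hl
          exact hR x l hl p hp
    · -- first occurrence of item in this row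
      simp only [Bool.not_eq_true] at hws
      have hnorow : ∀ l, im.get? item = some l → ¬ (row ∈ l.map Prod.fst) := by
        intro l hl hr
        have : PySem.Set.contains ws item = true := (hW item).mpr ⟨l, hl, hr⟩
        rw [hws] at this; exact absurd this (by simp)
      simp only [hws, if_true]
      cases him : im.get? item with
      | none =>
        have hcont : im.contains item = false := by
          rw [PySem.Dict.contains_eq_isSome_get?, him]; rfl
        have hicc : ic.contains item = false := by
          rw [PySem.Dict.contains_eq_isSome_get?, hC item, him]; rfl
        simp only [hcont, hicc, Bool.false_eq_true, if_true, if_false]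
        apply ih
        · intro x
          by_cases hx : x = item
          · subst hx
            rw [PySem.Dict.get?_insert_self, PySem.Dict.get?_insert_self]
            simp [pvRowCount, PySem.Set.ofList_eq_foldl, PySem.Set.add, PySem.Set.contains]
          · rw [PySem.Dict.get?_insert_of_ne _ _ hx, PySem.Dict.get?_insert_of_ne _ _ hx]
            exact hC x
        · intro x
          by_cases hx : x = item
          · subst hx
            rw [PySem.Dict.get?_insert_self]
            constructor
            · intro _; exact ⟨[(row, col)], rfl, by simp⟩
            · intro _
              simp [PySem.Set.contains, PySem.Set.mem_add]
          · rw [PySem.Dict.get?_insert_of_ne _ _ hx]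
            have : PySem.Set.contains (ws.add item) x = PySem.Set.contains ws x := by
              simp [PySem.Set.contains, PySem.Set.mem_add, hx]
            rw [this]
            exact hW x
        · intro x l hl p hp
          by_cases hx : x = item
          · subst hx
            rw [PySem.Dict.get?_insert_self] at hl
            cases hl
            simp at hp; subst hp; exact le_refl row
          · rw [PySem.Dict.get?_insert_of_ne _ _ hx] at hl
            exact hR x l hl p hp
      | some l₀ =>
        have hcont : im.contains item = true := by
          rw [PySem.Dict.contains_eq_isSome_get?, him]; rfl
        have hicc : ic.contains item = true := by
          rw [PySem.Dict.contains_eq_isSome_get?, hC item, him]; rfl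
        have hicd : ic.getD item 0 = pvRowCount l₀ := by
          rw [PySem.Dict.getD_eq_get?_getD, hC item, him]; rfl
        have hgetD : im.getD item [] = l₀ := PySem.Dict.getD_of_get?_eq_some im [] him
        have hrow : ¬ (row ∈ l₀.map Prod.fst) := hnorow l₀ him
        simp only [hcont, hicc, hgetD, hicd, Bool.true_eq_false, if_true, if_false]
        apply ih
        · intro x
          by_cases hx : x = item
          · subst hx
            rw [PySem.Dict.get?_insert_self, PySem.Dict.get?_insert_self]
            simp [pvRowCount_snoc, hrow]
          · rw [PySem.Dict.get?_insert_of_ne _ _ hx, PySem.Dict.get?_insert_of_ne _ _ hx]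
            exact hC x
        · intro x
          by_cases hx : x = item
          · subst hx
            rw [PySem.Dict.get?_insert_self]
            constructor
            · intro _; exact ⟨l₀ ++ [(row, col)], rfl, by simp⟩
            · intro _
              simp [PySem.Set.contains, PySem.Set.mem_add]
          · rw [PySem.Dict.get?_insert_of_ne _ _ hx]
            have : PySem.Set.contains (ws.add item) x = PySem.Set.contains ws x := by
              simp [PySem.Set.contains, PySem.Set.mem_add, hx]
            rw [this]
            exact hW x
        · intro x l hl p hp
          by_cases hx : x = item
          · subst hx
            rw [PySem.Dict.get?_insert_self] at hl
            cases hl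
            rcases List.mem_append.mp hp with h | h
            · exact hR _ l₀ him p h
            · simp at h; subst h; exact le_refl row
          · rw [PySem.Dict.get?_insert_of_ne _ _ hx] at hl
            exact hR x l hl p hp

theorem pvLoopA_inv (db : List (List String)) :
    ∀ (row : Int) im ic,
      (∀ x, ic.get? x = (im.get? x).map pvRowCount) →
      (∀ x l, im.get? x = some l → ∀ p ∈ l, p.1 < row) →
      ∀ x, (pvLoopA db row (im, ic)).2.get? x =
          ((pvLoopA db row (im, ic)).1.get? x).map pvRowCount := by
  induction db with
  | nil => intro row im ic hC _ x; exact hC x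
  | cons seq rest ih =>
    intro row im ic hC hR
    simp only [pvLoopA]
    have hW : ∀ x, PySem.Set.contains (PySem.Set.empty : PySem.Set String) x = true ↔
        ∃ l, im.get? x = some l ∧ row ∈ l.map Prod.fst := by
      intro x
      constructor
      · intro h; exact absurd h (by simp [PySem.Set.empty, PySem.Set.contains])
      · rintro ⟨l, hl, hr⟩
        rcases List.mem_map.mp hr with ⟨p, hp, hpr⟩
        have := hR x l hl p hp
        omega
    have hR' : ∀ x l, im.get? x = some l → ∀ p ∈ l, p.1 ≤ row := by
      intro x l hl p hp; exact le_of_lt (hR x l hl p hp)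
    obtain ⟨hC', hRle⟩ := pvInnerA_inv row seq 0 im ic PySem.Set.empty hC hW hR'
    exact ih (row + 1) _ _ hC' (fun x l hl p hp => by have := hRle x l hl p hp; omega)

theorem pvInnerB_nodup (row : Int) (seq : List String) :
    ∀ (col : Int) d, d.keys.Nodup → (pvInnerB row seq col d).keys.Nodup := by
  induction seq with
  | nil => intro col d h; simpa [pvInnerB] using h
  | cons item rest ih =>
    intro col d h
    simp only [pvInnerB]
    apply ih
    rw [PySem.Dict.keys_modify]
    exact PySem.Dict.nodup_keys_insert _ _ _ h

theorem pvLoopB_nodup (db : List (List String)) :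
    ∀ (row : Int) d, d.keys.Nodup → (pvLoopB db row d).keys.Nodup := by
  induction db with
  | nil => intro row d h; simpa [pvLoopB] using h
  | cons seq rest ih =>
    intro row d h
    simp only [pvLoopB]
    exact ih (row + 1) _ (pvInnerB_nodup row seq 0 d h)

-- ===== VERDICT (by name: the statement is the Claim_ definition above) =====
theorem get_freq_1_itemset_spec : Claim_equal_get_freq_1_itemset := by
  unfold Claim_equal_get_freq_1_itemset
  intro db minsup _
  unfold Spec_get_freq_1_itemset
  simp only [get_freq_1_itemset, get_freq_1_itemset_alt]
  have him : (pvLoopA db 0 (PySem.Dict.empty, PySem.Dict.empty)).1 = pvLoopB db 0 PySem.Dict.empty :=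
    pvLoopA_fst db 0 _ _
  have hC := pvLoopA_inv db 0 PySem.Dict.empty PySem.Dict.empty
    (by intro x; simp [PySem.Dict.get?_empty]) (by intro x l hl; simp [PySem.Dict.get?_empty] at hl)
  have hnd : (pvLoopB db 0 (PySem.Dict.empty : PySem.Dict String (List (Int × Int)))).keys.Nodup :=
    pvLoopB_nodup db 0 _ PySem.Dict.nodup_keys_empty
  rw [him]
  apply congrArg PySem.Dict.items
  apply PySem.List.foldl_congr_mem
  intro acc p hp
  obtain ⟨k, v⟩ := p
  have h1 : (pvLoopB db 0 PySem.Dict.empty).get? k = some v :=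
    PySem.Dict.get?_of_mem_items _ hp hnd
  have h2 := hC k
  rw [him, h1] at h2
  have h3 : (pvLoopA db 0 (PySem.Dict.empty, PySem.Dict.empty)).2.getD k 0 = pvRowCount v := by
    rw [PySem.Dict.getD_eq_get?_getD, h2]; rfl
  rw [h3]
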